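-- pv_equiv track=rewrite | github.com/cdclaxton/learning | Python/Music/random_lead_generator.py | build_bar
-- ===== SOURCE A (Python) =====
-- def build_bar(timings, notes):
--
--     bar =  "|            |            |            |            |\n"
--     bar += "| 1  e  &  a | 2  e  &  a | 3  e  &  a | 4  e  &  a |\n"
--     bar += "| "
--
--     j = 0
--     for i in range(16):
--         if i in timings:
--             bar += notes[j] + " "
--             j += 1
--         else:
--             bar += "  "
--
--         if i in [3,7,11, 15]:
--             bar += "| "
--         else:
--             bar += " "
--
--     return bar
-- ===== SOURCE B (Python) =====
-- def build_bar(timings, notes):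
--     header = ("|            |            |            |            |\n"
--               "| 1  e  &  a | 2  e  &  a | 3  e  &  a | 4  e  &  a |\n"
--               "| ")
--     EMPTY = ("   " * 3 + "  | ") * 4          # the fully empty 16-slot body
--     pos = lambda i: 3 * i + i // 4            # char offset of slot i in EMPTY
--     hits = [i for i in range(16) if i in timings]
--     body = ""
--     prev = 0
--     for k, h in enumerate(hits):
--         body += EMPTY[pos(prev):pos(h)]       # splice the blank gap before this hit
--         body += notes[k] + " " + ("| " if h % 4 == 3 else " ")
--         prev = h + 1
--     body += EMPTY[pos(prev):]                 # blank tail after the last hit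
--     return header + body
-- ===== Notes on version B (the rewrite author's own statement) =====
-- stated objective: alternative
-- what changed: Instead of A's 16-iteration per-slot loop threading a running note counter through the bar string, B loops only over the hit positions and splices each blank gap between consecutive hits out of a constant empty-bar template string by character-offset arithmetic (offset of slot i = 3*i + i//4).
-- outside the precondition, e.g. on build_bar([0, 2], ['K']): A raises IndexError, B raises IndexError
import Mathlib
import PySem

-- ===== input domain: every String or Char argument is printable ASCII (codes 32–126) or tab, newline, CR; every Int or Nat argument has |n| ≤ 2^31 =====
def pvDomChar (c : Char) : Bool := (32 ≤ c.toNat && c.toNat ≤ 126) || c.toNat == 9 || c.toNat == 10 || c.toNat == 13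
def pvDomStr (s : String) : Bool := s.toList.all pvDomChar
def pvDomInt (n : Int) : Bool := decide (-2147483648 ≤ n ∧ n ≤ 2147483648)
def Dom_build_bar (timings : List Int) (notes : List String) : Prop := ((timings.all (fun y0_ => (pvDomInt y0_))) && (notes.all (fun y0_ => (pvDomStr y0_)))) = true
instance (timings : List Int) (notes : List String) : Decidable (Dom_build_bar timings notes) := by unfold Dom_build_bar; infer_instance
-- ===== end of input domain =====

-- B loops only over the hit positions, splicing each blank gap between hits out of a constant
-- empty-bar template by character-offset arithmetic, instead of A's per-slot 16-step loop
-- (objective: alternative decomposition).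

-- ===== PORT A =====
def build_bar (timings : List Int) (notes : List String) : String :=
  let bar : String := "|            |            |            |            |\n"
  let bar := bar ++ "| 1  e  &  a | 2  e  &  a | 3  e  &  a | 4  e  &  a |\n"
  let bar := bar ++ "| "
  -- for i in range(16) with state (bar, j); notes[j] raises IndexError when j ≥ len(notes),
  -- which Pre_build_bar excludes (the .getD "" is never reached inside Pre_)
  let st := (PySem.List.pyRange 0 16 1).foldl (fun (st : String × Int) i =>
      let bj := if i ∈ timings
        then (st.1 ++ ((PySem.List.pyGet? notes st.2).getD "") ++ " ", st.2 + 1)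
        else (st.1 ++ "  ", st.2)
      (if i ∈ ([3, 7, 11, 15] : List Int) then bj.1 ++ "| " else bj.1 ++ " ", bj.2))
    (bar, 0)
  st.1

-- ===== PORT B =====
-- EMPTY = ("   " * 3 + "  | ") * 4, constant-folded to its literal value
def pvEMPTY : String := "           |            |            |            | "
-- pos = lambda i: 3 * i + i // 4   (char offset of slot i in EMPTY)
def pvPos : Int → Int := fun i => 3 * i + PySem.Int.floordiv i 4

def build_bar_alt (timings : List Int) (notes : List String) : String :=
  let header : String := "|            |            |            |            |\n| 1  e  &  a | 2  e  &  a | 3  e  &  a | 4  e  &  a |\n| "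
  let hits := (PySem.List.pyRange 0 16 1).filter (fun i => decide (i ∈ timings))
  -- for k, h in enumerate(hits): body += EMPTY[pos(prev):pos(h)] + notes[k] + " " + sep; prev = h+1
  -- notes[k] raises IndexError outside Pre_build_bar (the .getD "" is never reached inside Pre_)
  let st := (PySem.List.enumerate hits).foldl
    (fun (st : String × Int) p =>
      (st.1 ++ PySem.Str.slice pvEMPTY (some (pvPos st.2)) (some (pvPos p.2))
            ++ ((PySem.List.pyGet? notes p.1).getD "") ++ " "
            ++ (if PySem.Int.mod p.2 4 == 3 then "| " else " "),
       p.2 + 1)) ("", 0)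
  header ++ (st.1 ++ PySem.Str.slice pvEMPTY (some (pvPos st.2)) none)

-- ===== PRECONDITION & SPEC =====
-- Pre_ excludes exactly the inputs on which A (and B) raise IndexError: fewer notes than
-- distinct hit slots in 0..15.
def Pre_build_bar (timings : List Int) (notes : List String) : Prop :=
  ((PySem.List.pyRange 0 16 1).filter (fun i => decide (i ∈ timings))).length ≤ notes.length
instance (timings : List Int) (notes : List String) : Decidable (Pre_build_bar timings notes) := by
  unfold Pre_build_bar; infer_instance
def pvWitness_build_bar : List Int × List String := ([0, 4, 8, 12], ["K", "s", "K", "s"])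
def Spec_build_bar (timings : List Int) (notes : List String) (out : String) : Prop := out = build_bar_alt timings notes
instance (timings : List Int) (notes : List String) (out : String) : Decidable (Spec_build_bar timings notes out) := by unfold Spec_build_bar; infer_instance

-- ===== CLAIM (what is proved, stated in full; the proofs are below) =====
def Claim_equal_build_bar : Prop := ∀ (timings : List Int) (notes : List String), Dom_build_bar timings notes → Pre_build_bar timings notes → Spec_build_bar timings notes (build_bar timings notes)

-- ===== LEMMAS AND PROOFS =====

def pvNote (notes : List String) (j : Int) : String := (PySem.List.pyGet? notes j).getD ""
def pvHitsFrom (timings : List Int) (a : Int) : List Int :=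
  (PySem.List.pyRange a 16 1).filter (fun i => decide (i ∈ timings))

-- the per-slot rendering that port A's loop performs, with the running note index j
def pvRenderA (timings : List Int) (notes : List String) : List Int → Int → String
  | [], _ => ""
  | i :: L, j =>
    ((if i ∈ timings then pvNote notes j ++ " " else "  ") ++
      (if i ∈ ([3, 7, 11, 15] : List Int) then "| " else " ")) ++
    pvRenderA timings notes L (if i ∈ timings then j + 1 else j)

-- the gap-splicing rendering that port B's loop performs: (hits, note index, prev) ↦ body suffix
def pvGap (notes : List String) : List Int → Int → Int → String
  | [], _, prev => PySem.Str.slice pvEMPTY (some (pvPos prev)) none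
  | h :: rest, j, prev =>
    PySem.Str.slice pvEMPTY (some (pvPos prev)) (some (pvPos h)) ++ pvNote notes j ++ " " ++
      (if PySem.Int.mod h 4 == 3 then "| " else " ") ++ pvGap notes rest (j + 1) (h + 1)

theorem pvFoldA (timings : List Int) (notes : List String) (L : List Int) :
    ∀ (bar : String) (j : Int),
    (L.foldl (fun (st : String × Int) i =>
      let bj := if i ∈ timings
        then (st.1 ++ ((PySem.List.pyGet? notes st.2).getD "") ++ " ", st.2 + 1)
        else (st.1 ++ "  ", st.2)
      (if i ∈ ([3, 7, 11, 15] : List Int) then bj.1 ++ "| " else bj.1 ++ " ", bj.2)) (bar, j)).1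
    = bar ++ pvRenderA timings notes L j := by
  induction L with
  | nil => intro bar j; simp [pvRenderA]
  | cons i L ih =>
    intro bar j
    simp only [List.foldl_cons]
    rw [ih]
    by_cases hi : i ∈ timings <;>
      by_cases hs : i ∈ ([3, 7, 11, 15] : List Int) <;>
      simp [hi, hs, pvRenderA, pvNote, String.append_assoc]

theorem pvBuildA_eq (timings : List Int) (notes : List String) :
    build_bar timings notes
      = "|            |            |            |            |\n| 1  e  &  a | 2  e  &  a | 3  e  &  a | 4  e  &  a |\n| "
        ++ pvRenderA timings notes (PySem.List.pyRange 0 16 1) 0 := by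
  unfold build_bar
  rw [pvFoldA]
  rfl

theorem pvFoldB (notes : List String) (hits : List Int) :
    ∀ (s : Int) (acc : String) (p : Int),
    (let st := (PySem.List.enumerate hits s).foldl
      (fun (st : String × Int) q =>
        (st.1 ++ PySem.Str.slice pvEMPTY (some (pvPos st.2)) (some (pvPos q.2))
              ++ ((PySem.List.pyGet? notes q.1).getD "") ++ " "
              ++ (if PySem.Int.mod q.2 4 == 3 then "| " else " "),
         q.2 + 1)) (acc, p)
     st.1 ++ PySem.Str.slice pvEMPTY (some (pvPos st.2)) none)
    = acc ++ pvGap notes hits s p := by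
  induction hits with
  | nil =>
    intro s acc p
    simp [PySem.List.enumerate_nil, pvGap]
  | cons h rest ih =>
    intro s acc p
    rw [PySem.List.enumerate_cons]
    simp only [List.foldl_cons]
    rw [ih]
    simp [pvGap, pvNote, String.append_assoc]

theorem pvBuildB_eq (timings : List Int) (notes : List String) :
    build_bar_alt timings notes
      = "|            |            |            |            |\n| 1  e  &  a | 2  e  &  a | 3  e  &  a | 4  e  &  a |\n| "
        ++ pvGap notes (pvHitsFrom timings 0) 0 0 := by
  have h := pvFoldB notes (pvHitsFrom timings 0) 0 "" 0
  simp only [pvHitsFrom] at h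
  unfold build_bar_alt
  simp only []
  rw [h]
  simp [pvHitsFrom]

-- peeling one blank slot off the front of a gap: finite facts about pvEMPTY slices
theorem pvSliceSame (a : Int) (h0 : 0 ≤ a) (h16 : a < 16) :
    PySem.Str.slice pvEMPTY (some (pvPos a)) (some (pvPos a)) = "" := by
  interval_cases a <;> decide

theorem pvSlicePeelNone (a : Int) (h0 : 0 ≤ a) (h16 : a < 16) :
    PySem.Str.slice pvEMPTY (some (pvPos a)) none
      = ("  " ++ (if PySem.Int.mod a 4 == 3 then "| " else " ")) ++
        PySem.Str.slice pvEMPTY (some (pvPos (a + 1))) none := by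
  interval_cases a <;> decide

theorem pvSlicePeelSome (a h : Int) (h0 : 0 ≤ a) (hah : a < h) (hh : h ≤ 16) :
    PySem.Str.slice pvEMPTY (some (pvPos a)) (some (pvPos h))
      = ("  " ++ (if PySem.Int.mod a 4 == 3 then "| " else " ")) ++
        PySem.Str.slice pvEMPTY (some (pvPos (a + 1))) (some (pvPos h)) := by
  have h16 : a < 16 := by omega
  interval_cases a <;> interval_cases h <;> decide

theorem pvSep (a : Int) (h0 : 0 ≤ a) (h16 : a < 16) :
    (if PySem.Int.mod a 4 == 3 then ("| " : String) else " ")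
      = (if a ∈ ([3, 7, 11, 15] : List Int) then "| " else " ") := by
  interval_cases a <;> decide

theorem pvGapPeel (notes : List String) (L : List Int) (j a : Int)
    (h0 : 0 ≤ a) (h16 : a < 16) (hL : ∀ x ∈ L, a < x ∧ x ≤ 16) :
    pvGap notes L j a = ("  " ++ (if PySem.Int.mod a 4 == 3 then "| " else " ")) ++ pvGap notes L j (a + 1) := by
  cases L with
  | nil => simp [pvGap, pvSlicePeelNone a h0 h16, String.append_assoc]
  | cons h rest =>
    obtain ⟨hah, hh⟩ := hL h (by simp)
    simp [pvGap, pvSlicePeelSome a h h0 hah hh, String.append_assoc]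

theorem pvMemHitsFrom (timings : List Int) (a x : Int) (hx : x ∈ pvHitsFrom timings a) :
    a ≤ x ∧ x ≤ 16 := by
  unfold pvHitsFrom at hx
  rw [List.mem_filter] at hx
  have := (PySem.List.mem_pyRange_one (a := a) (b := 16) (x := x)).mp hx.1
  omega

-- port A's loop over the remaining slots equals port B's gap splicing over the remaining hits
theorem pvMain (timings : List Int) (notes : List String) :
    ∀ (k : Nat) (a j : Int), 0 ≤ a → a + k = 16 →
    pvRenderA timings notes (PySem.List.pyRange a 16 1) j
      = pvGap notes (pvHitsFrom timings a) j a := by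
  intro k
  induction k with
  | zero =>
    intro a j h0 hk
    have : a = 16 := by omega
    subst this
    rw [PySem.List.pyRange_one_eq_nil (by omega)]
    have hH : pvHitsFrom timings 16 = [] := by
      unfold pvHitsFrom
      rw [PySem.List.pyRange_one_eq_nil (by omega)]
      simp
    rw [hH]
    simp only [pvRenderA, pvGap]
    decide
  | succ k ih =>
    intro a j h0 hk
    have h16 : a < 16 := by omega
    have hcons : PySem.List.pyRange a 16 1 = a :: PySem.List.pyRange (a + 1) 16 1 :=
      PySem.List.pyRange_one_cons (by omega)
    have hH : pvHitsFrom timings a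
        = if a ∈ timings then a :: pvHitsFrom timings (a + 1) else pvHitsFrom timings (a + 1) := by
      unfold pvHitsFrom
      rw [hcons, List.filter_cons]
      by_cases hm : a ∈ timings <;> simp [hm]
    rw [hcons, hH]
    simp only [pvRenderA]
    by_cases hm : a ∈ timings
    · simp only [hm, if_pos]
      rw [ih (a + 1) (j + 1) (by omega) (by omega)]
      simp only [pvGap]
      rw [pvSliceSame a h0 h16, pvSep a h0 h16]
      simp [String.append_assoc]
    · simp only [hm, if_neg, not_false_iff]
      rw [ih (a + 1) j (by omega) (by omega)]
      rw [pvGapPeel notes _ j a h0 h16 (fun x hx => by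
        have := pvMemHitsFrom timings (a + 1) x hx; omega)]
      rw [pvSep a h0 h16]

-- ===== VERDICT (by name: the statement is the Claim_ definition above) =====
theorem build_bar_spec : Claim_equal_build_bar := by
  intro timings notes _ _
  unfold Spec_build_bar
  rw [pvBuildA_eq, pvBuildB_eq]
  congr 1
  exact pvMain timings notes 16 0 0 (by norm_num) (by norm_num)
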